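-- pv_equiv track=rewrite | github.com/jyc0011/backjoon | 백준/Bronze/16205. 변수명/변수명.py | convert
-- ===== SOURCE A (Python) =====
-- def convert(n, a):
--     result = ["", "", ""]
--     if n == "1":  # camelCase
--         result[0] = a
--         result[1] = "".join(["_" + i.lower() if i.isupper() else i for i in a])
--         result[2] = a[0].upper() + a[1:]
--     elif n == "2":  # snake_case
--         words = a.split('_')
--         result[0] = words[0] + "".join([i.capitalize() for i in words[1:]])
--         result[1] = a
--         result[2] = "".join([i.capitalize() for i in words])
--     else:  # PascalCase
--         result[0] = a[0].lower() + a[1:]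
--         result[1] = a[0].lower() + "".join(["_" + i.lower() if i.isupper() else i for i in a[1:]])
--         result[2] = a
--     return result
-- ===== SOURCE B (Python) =====
-- def _tokenize(s):
--     # split a camelCase string into words: a new word starts at each
--     # uppercase letter, which is lowercased
--     words = [[]]
--     for ch in s:
--         if ch.isupper():
--             words.append([ch.lower()])
--         else:
--             words[-1].append(ch)
--     return ["".join(w) for w in words]
--
--
-- def _to_camel(ws):
--     return ws[0] + "".join(w.capitalize() for w in ws[1:])
--
--
-- def _to_snake(ws):
--     return "_".join(ws)
--
--
-- def _to_pascal(ws):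
--     return "".join(w.capitalize() for w in ws)
--
--
-- def convert(n, a):
--     if n == "2":  # snake_case input: parse by '_', regenerate the others
--         words = a.split('_')
--         return [_to_camel(words), a, _to_pascal(words)]
--     # camelCase ("1") or PascalCase (anything else) input
--     camel = a if n == "1" else a[0].lower() + a[1:]
--     words = _tokenize(camel)
--     pascal = _to_pascal(words) if n == "1" else a
--     return [camel, _to_snake(words), pascal]
-- ===== Notes on version B (the rewrite author's own statement) =====
-- stated objective: alternative
-- what changed: B parses the input once into a word list (split on '_' for snake, or start a new lowercased word before each uppercase letter for camel/Pascal) and regenerates the other conventions with shared to_camel/to_snake/to_pascal helpers, replacing A's three independent per-branch string builders.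
import Mathlib
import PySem

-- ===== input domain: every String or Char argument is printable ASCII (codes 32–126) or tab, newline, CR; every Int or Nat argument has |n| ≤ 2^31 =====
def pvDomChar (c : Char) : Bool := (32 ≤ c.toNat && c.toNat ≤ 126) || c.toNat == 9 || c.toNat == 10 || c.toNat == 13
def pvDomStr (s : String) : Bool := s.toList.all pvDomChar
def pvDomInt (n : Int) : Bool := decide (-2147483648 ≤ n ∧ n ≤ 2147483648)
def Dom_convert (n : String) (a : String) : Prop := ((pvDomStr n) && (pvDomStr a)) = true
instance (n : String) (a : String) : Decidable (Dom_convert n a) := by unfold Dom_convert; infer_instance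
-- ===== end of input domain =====

-- B parses the input into a word list and regenerates the other two conventions from shared
-- to_camel/to_snake/to_pascal helpers, instead of A's three independent per-branch string
-- builders (objective: alternative decomposition, same cost).

-- ===== PORT A =====
-- exact port of str.capitalize on the ASCII domain (where titlecase = uppercase); used by both ports
def pyCapitalize (w : List Char) : List Char :=
  match w with
  | [] => []
  | c :: r => PySem.Chars.upperChar c :: PySem.Chars.lower r

-- the comprehension element `"_" + i.lower() if i.isupper() else i` (A uses it in two branches)
def pySnakeChar (i : Char) : List Char :=
  if PySem.Chars.isupper i then '_' :: [PySem.Chars.lowerChar i] else [i]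

def convert (n : String) (a : String) : List String :=
  if n == "1" then
    [a,
     String.ofList (PySem.Chars.join [] (a.toList.map pySnakeChar)),
     String.ofList (match a.toList with
       | [] => []        -- Python: a[0] raises IndexError here; excluded by Pre_convert
       | c :: r => PySem.Chars.upperChar c :: r)]
  else if n == "2" then
    let words := PySem.Chars.splitOn a.toList ['_']
    [String.ofList (words.headD [] ++ PySem.Chars.join [] ((words.drop 1).map pyCapitalize)),
     a,
     String.ofList (PySem.Chars.join [] (words.map pyCapitalize))]
  else
    match a.toList with
    | [] => ["", "", ""]  -- Python: a[0] raises IndexError here; excluded by Pre_convert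
    | c :: r =>
        [String.ofList (PySem.Chars.lowerChar c :: r),
         String.ofList (PySem.Chars.lowerChar c ::
           PySem.Chars.join [] (r.map pySnakeChar)),
         a]

-- ===== PORT B =====
-- loop body of _tokenize: `words.append(ch.lower())` / `words[-1] += ch` (words is never empty)
def tokStep (ws : List (List Char)) (ch : Char) : List (List Char) :=
  if PySem.Chars.isupper ch then ws ++ [[PySem.Chars.lowerChar ch]]
  else ws.dropLast ++ [ws.getLastD [] ++ [ch]]

def pyTokenize (s : List Char) : List (List Char) := s.foldl tokStep [[]]

def toCamelW (ws : List (List Char)) : List Char :=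
  ws.headD [] ++ PySem.Chars.join [] ((ws.drop 1).map pyCapitalize)

def toSnakeW (ws : List (List Char)) : List Char := PySem.Chars.join ['_'] ws

def toPascalW (ws : List (List Char)) : List Char :=
  PySem.Chars.join [] (ws.map pyCapitalize)

def convert_alt (n : String) (a : String) : List String :=
  if n == "2" then
    let words := PySem.Chars.splitOn a.toList ['_']
    [String.ofList (toCamelW words), a, String.ofList (toPascalW words)]
  else
    let camel : List Char :=
      if n == "1" then a.toList
      else match a.toList with
        | [] => []        -- Python: a[0] raises IndexError here; excluded by Pre_convert
        | c :: r => PySem.Chars.lowerChar c :: r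
    let words := pyTokenize camel
    [String.ofList camel,
     String.ofList (toSnakeW words),
     if n == "1" then String.ofList (toPascalW words) else a]

-- ===== PRECONDITION & SPEC =====
-- Pre_ excludes exactly the inputs on which Python A raises IndexError (a == "" with n ≠ "2": a[0] fails)
def Pre_convert (n : String) (a : String) : Prop := n = "2" ∨ a ≠ ""
instance (n : String) (a : String) : Decidable (Pre_convert n a) := by unfold Pre_convert; infer_instance

def pvWitness_convert : String × String := ("1", "fooBar")

def Spec_convert (n : String) (a : String) (out : List String) : Prop := out = convert_alt n a
instance (n : String) (a : String) (out : List String) : Decidable (Spec_convert n a out) := by unfold Spec_convert; infer_instance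

-- ===== CLAIM (what is proved, stated in full; the proofs are below) =====
def Claim_equal_convert : Prop := ∀ (n : String) (a : String), Dom_convert n a → Pre_convert n a → Spec_convert n a (convert n a)

-- ===== LEMMAS AND PROOFS =====

-- character-class facts about the PySem case primitives
lemma isupper_iff (c : Char) : PySem.Chars.isupper c = true ↔ 65 ≤ c.toNat ∧ c.toNat ≤ 90 := by
  unfold PySem.Chars.isupper
  rw [Bool.and_eq_true, decide_eq_true_iff, decide_eq_true_iff, Char.le_def, Char.le_def,
    UInt32.le_iff_toNat_le, UInt32.le_iff_toNat_le]
  exact Iff.rfl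

lemma islower_iff (c : Char) : PySem.Chars.islower c = true ↔ 97 ≤ c.toNat ∧ c.toNat ≤ 122 := by
  unfold PySem.Chars.islower
  rw [Bool.and_eq_true, decide_eq_true_iff, decide_eq_true_iff, Char.le_def, Char.le_def,
    UInt32.le_iff_toNat_le, UInt32.le_iff_toNat_le]
  exact Iff.rfl

lemma lowerChar_of_not_upper (c : Char) (h : PySem.Chars.isupper c = false) :
    PySem.Chars.lowerChar c = c := by
  simp [PySem.Chars.lowerChar, h]

lemma isupper_lowerChar (c : Char) : PySem.Chars.isupper (PySem.Chars.lowerChar c) = false := by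
  by_cases h : PySem.Chars.isupper c = true
  · obtain ⟨h1, h2⟩ := (isupper_iff c).mp h
    have hv : (Char.ofNat (c.toNat + 32)).toNat = c.toNat + 32 := by
      rw [Char.toNat_ofNat, if_pos]; exact Or.inl (by omega)
    rw [PySem.Chars.lowerChar, if_pos h, ← Bool.not_eq_true, isupper_iff, hv]
    omega
  · rw [lowerChar_of_not_upper c (by simpa using h)]
    simpa using h

lemma upperChar_of_upper (c : Char) (h : PySem.Chars.isupper c = true) :
    PySem.Chars.upperChar c = c := by
  obtain ⟨h1, h2⟩ := (isupper_iff c).mp h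
  have hl : PySem.Chars.islower c = false := by
    rw [← Bool.not_eq_true, islower_iff]; omega
  simp [PySem.Chars.upperChar, hl]

lemma upperChar_lowerChar (c : Char) (h : PySem.Chars.isupper c = true) :
    PySem.Chars.upperChar (PySem.Chars.lowerChar c) = c := by
  obtain ⟨h1, h2⟩ := (isupper_iff c).mp h
  have hv : (Char.ofNat (c.toNat + 32)).toNat = c.toNat + 32 := by
    rw [Char.toNat_ofNat, if_pos]; exact Or.inl (by omega)
  rw [PySem.Chars.lowerChar, if_pos h, PySem.Chars.upperChar, if_pos (by rw [islower_iff, hv]; omega)]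
  rw [hv]
  have : c.toNat + 32 - 32 = c.toNat := by omega
  rw [this, Char.ofNat_toNat]

lemma lower_of_all_not_upper (t : List Char) (h : ∀ x ∈ t, PySem.Chars.isupper x = false) :
    PySem.Chars.lower t = t := by
  unfold PySem.Chars.lower
  rw [List.map_congr_left (fun x hx => lowerChar_of_not_upper x (h x hx))]
  simp

-- join [] is concatenation, one cons at a time
lemma join_nil_cons (p : List Char) (ps : List (List Char)) :
    PySem.Chars.join [] (p :: ps) = p ++ PySem.Chars.join [] ps := by
  cases ps with
  | nil => simp [PySem.Chars.join_singleton, PySem.Chars.join_nil]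
  | cons q rest => rw [PySem.Chars.join_cons_cons]; simp

-- the tokenizer in "front recursion" form: tokAux cur cs = the words of cur ++ cs,
-- where cur is the word currently being built
def tokAux (cur : List Char) : List Char → List (List Char)
  | [] => [cur]
  | c :: r =>
      if PySem.Chars.isupper c then cur :: tokAux [PySem.Chars.lowerChar c] r
      else tokAux (cur ++ [c]) r

lemma tokAux_ne_nil (cs : List Char) : ∀ cur, tokAux cur cs ≠ [] := by
  induction cs with
  | nil => intro cur; simp [tokAux]
  | cons c r ih =>
      intro cur
      unfold tokAux
      split
      · simp
      · exact ih _

-- B's foldl tokenizer computes tokAux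
lemma foldl_tokStep (cs : List Char) : ∀ done cur,
    List.foldl tokStep (done ++ [cur]) cs = done ++ tokAux cur cs := by
  induction cs with
  | nil => intro done cur; simp [tokAux]
  | cons c r ih =>
      intro done cur
      rw [List.foldl_cons]
      by_cases h : PySem.Chars.isupper c = true
      · have ht : tokAux cur (c :: r) = cur :: tokAux [PySem.Chars.lowerChar c] r := by
          rw [tokAux, if_pos h]
        rw [ht, show tokStep (done ++ [cur]) c = (done ++ [cur]) ++ [[PySem.Chars.lowerChar c]] from by
            simp [tokStep, h],
          ih (done ++ [cur]) [PySem.Chars.lowerChar c]]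
        simp
      · have ht : tokAux cur (c :: r) = tokAux (cur ++ [c]) r := by
          rw [tokAux, if_neg h]
        rw [ht, show tokStep (done ++ [cur]) c = done ++ [cur ++ [c]] from by
            simp [tokStep, h],
          ih done (cur ++ [c])]

lemma pyTokenize_eq (cs : List Char) : pyTokenize cs = tokAux [] cs := by
  have := foldl_tokStep cs [] []
  simpa [pyTokenize] using this

-- '_'.join of the words rebuilds exactly A's per-character snake construction
lemma join_snake (cs : List Char) : ∀ cur,
    PySem.Chars.join ['_'] (tokAux cur cs) = cur ++ PySem.Chars.join [] (cs.map pySnakeChar) := by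
  induction cs with
  | nil => intro cur; simp [tokAux, PySem.Chars.join_singleton, PySem.Chars.join_nil]
  | cons c r ih =>
      intro cur
      unfold tokAux
      rw [List.map_cons, join_nil_cons]
      by_cases h : PySem.Chars.isupper c = true
      · rw [if_pos h]
        rcases htok : tokAux [PySem.Chars.lowerChar c] r with _ | ⟨q, rest⟩
        · exact absurd htok (tokAux_ne_nil r _)
        · rw [PySem.Chars.join_cons_cons, ← htok, ih]
          simp [pySnakeChar, h]
      · rw [if_neg (by simpa using h), ih]
        simp [pySnakeChar, h]

-- capitalizing every word rebuilds "first character uppercased, rest unchanged"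
lemma join_pascal (cs : List Char) : ∀ (c0 : Char) (t : List Char),
    (∀ x ∈ t, PySem.Chars.isupper x = false) →
    PySem.Chars.join [] ((tokAux (c0 :: t) cs).map pyCapitalize) =
      PySem.Chars.upperChar c0 :: (t ++ cs) := by
  induction cs with
  | nil =>
      intro c0 t ht
      simp [tokAux, pyCapitalize, PySem.Chars.join_singleton, lower_of_all_not_upper t ht]
  | cons c r ih =>
      intro c0 t ht
      unfold tokAux
      by_cases h : PySem.Chars.isupper c = true
      · rw [if_pos h, List.map_cons, join_nil_cons,
          ih (PySem.Chars.lowerChar c) [] (by simp)]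
        simp [pyCapitalize, lower_of_all_not_upper t ht, upperChar_lowerChar c h]
      · rw [if_neg (by simpa using h)]
        have := ih c0 (t ++ [c]) (by
          intro x hx
          rcases List.mem_append.mp hx with hx | hx
          · exact ht x hx
          · simp at hx; subst hx; simpa using h)
        simpa using this

-- the pascal form of the tokenization of a nonempty string
lemma pascal_tok (c : Char) (r : List Char) :
    toPascalW (tokAux [] (c :: r)) = PySem.Chars.upperChar c :: r := by
  unfold tokAux toPascalW
  by_cases h : PySem.Chars.isupper c = true
  · rw [if_pos h, List.map_cons, join_nil_cons, join_pascal r (PySem.Chars.lowerChar c) [] (by simp)]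
    simp [pyCapitalize, upperChar_lowerChar c h, upperChar_of_upper c h]
  · rw [if_neg (by simpa using h)]
    exact join_pascal r c [] (by simp)

lemma toList_ne_nil_of_ne_empty (a : String) (h : a ≠ "") : a.toList ≠ [] := by
  simpa [String.toList_eq_nil_iff] using h

-- ===== VERDICT (by name: the statement is the Claim_ definition above) =====
theorem convert_spec : Claim_equal_convert := by
  intro n a _hdom hpre
  unfold Spec_convert convert convert_alt
  by_cases h1 : n = "1"
  · subst h1
    have ha : a.toList ≠ [] := toList_ne_nil_of_ne_empty a (by
      rcases hpre with h | h
      · exact absurd h (by decide)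
      · exact h)
    rcases hcs : a.toList with _ | ⟨c, r⟩
    · exact absurd hcs ha
    · have e1 : a = String.ofList (c :: r) := by rw [← hcs, String.ofList_toList]
      have e2 : toSnakeW (pyTokenize (c :: r)) =
          PySem.Chars.join [] ((c :: r).map pySnakeChar) := by
        rw [pyTokenize_eq, toSnakeW]
        simpa using join_snake (c :: r) []
      have e3 : toPascalW (pyTokenize (c :: r)) = PySem.Chars.upperChar c :: r := by
        rw [pyTokenize_eq, pascal_tok]
      simp only [show (("1" : String) == "1") = true from rfl,
        show (("1" : String) == "2") = false from rfl, Bool.false_eq_true, if_true, if_false,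
        e2, e3]
      exact congrArg (fun s => [s,
        String.ofList (PySem.Chars.join [] (List.map pySnakeChar (c :: r))),
        String.ofList (PySem.Chars.upperChar c :: r)]) e1
  · by_cases h2 : n = "2"
    · subst h2
      simp [show (("2" : String) == "1") = false from rfl, toCamelW, toPascalW]
    · have hb1 : (n == "1") = false := by simpa using h1
      have hb2 : (n == "2") = false := by simpa using h2
      have ha : a.toList ≠ [] := toList_ne_nil_of_ne_empty a (by
        rcases hpre with h | h
        · exact absurd h h2
        · exact h)
      rcases hcs : a.toList with _ | ⟨c, r⟩
      · exact absurd hcs ha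
      · simp only [hb1, hb2, if_false, Bool.false_eq_true]
        have e2 : toSnakeW (pyTokenize (PySem.Chars.lowerChar c :: r)) =
            PySem.Chars.lowerChar c :: PySem.Chars.join [] (r.map pySnakeChar) := by
          rw [pyTokenize_eq, toSnakeW]
          unfold tokAux
          rw [if_neg (by simp [isupper_lowerChar])]
          simpa using join_snake r [PySem.Chars.lowerChar c]
        rw [e2]
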